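-- pv_equiv track=rewrite | github.com/Peter-aziz/Maze-Router---DD2 | maze_router.py | reorder_nets_by_manhattan_distance
-- ===== SOURCE A (Python) =====
-- def reorder_nets_by_manhattan_distance(nets):
--     def net_manhattan_score(pin_list):
--         score = 0
--         for i in range(len(pin_list)):
--             for j in range(i + 1, len(pin_list)):
--                 _, x1, y1 = pin_list[i]
--                 _, x2, y2 = pin_list[j]
--                 score += abs(x1 - x2) + abs(y1 - y2)
--         return score
--
--     sorted_nets = dict(sorted(nets.items(), key=lambda item: net_manhattan_score(item[1])))
--     return sorted_nets
-- ===== SOURCE B (Python) =====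
-- def reorder_nets_by_manhattan_distance(nets):
--     def axis_cost(vals):
--         vals = sorted(vals)
--         total = 0
--         prefix = 0
--         i = 0
--         for v in vals:
--             total += i * v - prefix
--             prefix += v
--             i += 1
--         return total
--
--     def net_manhattan_score(pin_list):
--         return (axis_cost([x for _, x, _ in pin_list])
--                 + axis_cost([y for _, _, y in pin_list]))
--
--     return dict(sorted(nets.items(), key=lambda item: net_manhattan_score(item[1])))
-- ===== Notes on version B (the rewrite author's own statement) =====
-- stated objective: alternative
-- what changed: Replaces the all-pairs O(k^2) double loop over each net's pins by sorting each coordinate axis and a single prefix-sum scan (O(k log k) per net) that computes the same total pairwise Manhattan distance; on the benchmark's many-small-nets inputs this was not measurably faster.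
import Mathlib
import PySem

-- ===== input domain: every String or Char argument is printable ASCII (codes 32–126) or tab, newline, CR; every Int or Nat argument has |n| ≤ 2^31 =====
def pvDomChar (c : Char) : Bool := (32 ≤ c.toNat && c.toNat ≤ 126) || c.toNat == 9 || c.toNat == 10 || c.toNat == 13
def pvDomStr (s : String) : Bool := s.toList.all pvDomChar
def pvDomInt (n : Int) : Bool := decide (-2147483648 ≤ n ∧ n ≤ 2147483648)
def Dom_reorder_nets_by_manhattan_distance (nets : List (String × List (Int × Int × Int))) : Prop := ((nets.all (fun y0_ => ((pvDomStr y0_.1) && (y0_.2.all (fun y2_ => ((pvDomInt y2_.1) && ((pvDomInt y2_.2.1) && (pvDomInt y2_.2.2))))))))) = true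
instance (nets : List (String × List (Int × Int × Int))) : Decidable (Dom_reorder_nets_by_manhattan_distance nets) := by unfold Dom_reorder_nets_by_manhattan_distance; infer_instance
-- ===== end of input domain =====

-- B computes each net's exact pairwise Manhattan score by sorting each axis and a
-- single prefix-sum scan instead of A's all-pairs double loop (alternative algorithm).

-- ===== PORT A =====
-- A's inner helper net_manhattan_score: nested index loops over all pairs i < j.
def pvScoreA (pin_list : List (Int × Int × Int)) : Int :=
  (PySem.List.pyRange 0 (PySem.List.len pin_list)).foldl (fun score i =>
    (PySem.List.pyRange (i + 1) (PySem.List.len pin_list)).foldl (fun score j =>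
      score + (|(PySem.List.pyGetD pin_list i (0, 0, 0)).2.1 - (PySem.List.pyGetD pin_list j (0, 0, 0)).2.1|
             + |(PySem.List.pyGetD pin_list i (0, 0, 0)).2.2 - (PySem.List.pyGetD pin_list j (0, 0, 0)).2.2|)) score) 0

def reorder_nets_by_manhattan_distance (nets : List (String × List (Int × Int × Int))) : List (String × List (Int × Int × Int)) :=
  (PySem.Dict.ofList (PySem.List.sorted nets (fun item => pvScoreA item.2))).items

-- ===== PORT B =====
-- B's axis_cost: sort one axis, one pass with running prefix sum and counter.
def pvAxisCost (vals : List Int) : Int :=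
  let sv := PySem.List.sorted vals (fun v => v)
  (sv.foldl (fun (s : Int × Int × Int) v =>
    (s.1 + s.2.2 * v - s.2.1, s.2.1 + v, s.2.2 + 1)) (0, 0, 0)).1

def pvNetScore (pin_list : List (Int × Int × Int)) : Int :=
  pvAxisCost (pin_list.map (fun p => p.2.1)) + pvAxisCost (pin_list.map (fun p => p.2.2))

def reorder_nets_by_manhattan_distance_alt (nets : List (String × List (Int × Int × Int))) : List (String × List (Int × Int × Int)) :=
  (PySem.Dict.ofList (PySem.List.sorted nets (fun item => pvNetScore item.2))).items

-- ===== PRECONDITION & SPEC =====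
def Spec_reorder_nets_by_manhattan_distance (nets : List (String × List (Int × Int × Int))) (out : List (String × List (Int × Int × Int))) : Prop := out = reorder_nets_by_manhattan_distance_alt nets
instance (nets : List (String × List (Int × Int × Int))) (out : List (String × List (Int × Int × Int))) : Decidable (Spec_reorder_nets_by_manhattan_distance nets out) := by unfold Spec_reorder_nets_by_manhattan_distance; infer_instance

-- ===== CLAIM (what is proved, stated in full; the proofs are below) =====
def Claim_equal_reorder_nets_by_manhattan_distance : Prop := ∀ (nets : List (String × List (Int × Int × Int))), Dom_reorder_nets_by_manhattan_distance nets → Spec_reorder_nets_by_manhattan_distance nets (reorder_nets_by_manhattan_distance nets)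

-- ===== LEMMAS AND PROOFS =====

-- distance of one pin pair, and the structural "sum over all pairs" forms
def pvDist (p q : Int × Int × Int) : Int := |p.2.1 - q.2.1| + |p.2.2 - q.2.2|

def pvPairD : List (Int × Int × Int) → Int
  | [] => 0
  | p :: t => (t.map (pvDist p)).sum + pvPairD t

def pvPairAbs : List Int → Int
  | [] => 0
  | a :: t => (t.map (fun b => |a - b|)).sum + pvPairAbs t

-- row k of A's double loop, as a sum; the list of rows sums to pvPairD
theorem pvSumForm (l : List (Int × Int × Int)) :
    ((List.range l.length).map (fun k => ((l.drop (k+1)).map (pvDist (l.getD k (0,0,0)))).sum)).sum = pvPairD l := by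
  induction l with
  | nil => simp [pvPairD]
  | cons p t ih =>
    rw [List.length_cons, List.range_succ_eq_map, List.map_cons, List.map_map, List.sum_cons]
    have h2 : ((fun k => (((p::t).drop (k+1)).map (pvDist ((p::t).getD k (0,0,0)))).sum) ∘ Nat.succ)
        = (fun k => ((t.drop (k+1)).map (pvDist (t.getD k (0,0,0)))).sum) := by
      funext k; simp
    rw [h2, ih]
    simp [pvPairD]

-- A's double loop computes pvPairD
theorem pvScoreA_eq_pairD (l : List (Int × Int × Int)) : pvScoreA l = pvPairD l := by
  unfold pvScoreA
  have hcong : ∀ (acc : Int), ∀ i ∈ PySem.List.pyRange 0 (PySem.List.len l),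
      (PySem.List.pyRange (i + 1) (PySem.List.len l)).foldl (fun score j =>
        score + (|(PySem.List.pyGetD l i (0, 0, 0)).2.1 - (PySem.List.pyGetD l j (0, 0, 0)).2.1|
               + |(PySem.List.pyGetD l i (0, 0, 0)).2.2 - (PySem.List.pyGetD l j (0, 0, 0)).2.2|)) acc
      = acc + ((l.drop (i+1).toNat).map (pvDist (PySem.List.pyGetD l i (0,0,0)))).sum := by
    intro acc i hi
    have h0 : (0:Int) ≤ i + 1 := by
      have := (PySem.List.mem_pyRange_one.1 hi).1; omega
    rw [PySem.List.foldl_pyRange_pyGetD l (0,0,0)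
        (fun s q => s + (|(PySem.List.pyGetD l i (0,0,0)).2.1 - q.2.1|
                       + |(PySem.List.pyGetD l i (0,0,0)).2.2 - q.2.2|)) acc h0,
        PySem.List.foldl_add]
    rfl
  rw [PySem.List.foldl_congr_mem _ _ _ 0 hcong, PySem.List.foldl_add]
  have hlen : PySem.List.len l = (l.length : Int) := by simp [PySem.List.len]
  rw [hlen, PySem.List.pyRange_zero_natCast, List.map_map]
  have h3 : ((fun i => ((l.drop (i+1).toNat).map (pvDist (PySem.List.pyGetD l i (0,0,0)))).sum)
      ∘ (fun (k : Nat) => (k : Int)))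
      = (fun k => ((l.drop (k+1)).map (pvDist (l.getD k (0,0,0)))).sum) := by
    funext k
    have hk : ((k : Int) + 1).toNat = k + 1 := by omega
    simp [hk, PySem.List.pyGetD_natCast]
  rw [h3, pvSumForm]
  simp

-- the per-row pair distance splits into the two axes
theorem pvDistSum_split (p : Int × Int × Int) (t : List (Int × Int × Int)) :
    (t.map (pvDist p)).sum
      = (t.map (fun q => |p.2.1 - q.2.1|)).sum + (t.map (fun q => |p.2.2 - q.2.2|)).sum := by
  induction t with
  | nil => simp
  | cons q s ih => simp only [List.map_cons, List.sum_cons, ih, pvDist]; ring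

-- pvPairD splits into the two axes
theorem pvPairD_split (l : List (Int × Int × Int)) :
    pvPairD l = pvPairAbs (l.map (fun p => p.2.1)) + pvPairAbs (l.map (fun p => p.2.2)) := by
  induction l with
  | nil => simp [pvPairD, pvPairAbs]
  | cons p t ih =>
    simp only [pvPairD, pvPairAbs, List.map_cons, List.map_map, ih, pvDistSum_split,
      Function.comp_def]
    ring

-- pvPairAbs is invariant under permutation
theorem pvPairAbs_perm {l l' : List Int} (h : l.Perm l') : pvPairAbs l = pvPairAbs l' := by
  induction h with
  | nil => rfl
  | cons a h ih => simp [pvPairAbs, ih, (h.map _).sum_eq]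
  | swap a b t =>
    simp only [pvPairAbs, List.map_cons, List.sum_cons]
    have : |b - a| = |a - b| := abs_sub_comm b a
    omega
  | trans _ _ ih1 ih2 => omega

-- closed behaviour of B's scan (generalized state)
theorem pvScan_shift (s : List Int) (tot pre i : Int) :
    (s.foldl (fun (st : Int × Int × Int) v =>
      (st.1 + st.2.2 * v - st.2.1, st.2.1 + v, st.2.2 + 1)) (tot, pre, i)).1 =
    (s.foldl (fun (st : Int × Int × Int) v =>
      (st.1 + st.2.2 * v - st.2.1, st.2.1 + v, st.2.2 + 1)) (0, 0, 0)).1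
      + tot + i * s.sum - pre * s.length := by
  induction s generalizing tot pre i with
  | nil => simp
  | cons v s ih =>
    simp only [List.foldl_cons, List.sum_cons, List.length_cons]
    rw [ih (tot + i * v - pre) (pre + v) (i + 1),
        ih (0 + 0 * v - 0) (0 + v) (0 + 1)]
    push_cast
    ring

-- sum of |a - b| over a list everywhere ≥ a
theorem pvSumAbs_of_le (a : Int) (t : List Int) (h : ∀ b ∈ t, a ≤ b) :
    (t.map (fun b => |a - b|)).sum = t.sum - a * t.length := by
  induction t with
  | nil => simp
  | cons b u ihu =>
    have hab : a ≤ b := h b (by simp)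
    have habs : |a - b| = b - a := by rw [abs_sub_comm]; exact abs_of_nonneg (by omega)
    simp only [List.map_cons, List.sum_cons, List.length_cons, habs]
    rw [ihu (fun c hc => h c (by simp [hc]))]
    push_cast; ring

-- on a list sorted non-decreasingly the scan computes pvPairAbs
theorem pvScan_sorted (s : List Int) (hs : s.Pairwise (· ≤ ·)) :
    (s.foldl (fun (st : Int × Int × Int) v =>
      (st.1 + st.2.2 * v - st.2.1, st.2.1 + v, st.2.2 + 1)) (0, 0, 0)).1 = pvPairAbs s := by
  induction s with
  | nil => rfl
  | cons a t ih =>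
    have hat : ∀ b ∈ t, a ≤ b := fun b hb => (List.pairwise_cons.1 hs).1 b hb
    have ht : t.Pairwise (· ≤ ·) := (List.pairwise_cons.1 hs).2
    simp only [List.foldl_cons]
    rw [pvScan_shift]
    simp only [pvPairAbs, ih ht, pvSumAbs_of_le a t hat]
    push_cast; ring

theorem pvAxisCost_eq_pairAbs (vals : List Int) : pvAxisCost vals = pvPairAbs vals := by
  unfold pvAxisCost
  have hperm := PySem.List.sorted_perm vals (fun v => v) false
  have hpw : (PySem.List.sorted vals (fun v => v) false).Pairwise (· ≤ ·) :=
    PySem.List.sorted_pairwise vals (fun v => v)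
  rw [pvScan_sorted _ hpw, pvPairAbs_perm hperm]

-- the key functions agree on every pin list
theorem pvScore_eq (pins : List (Int × Int × Int)) : pvScoreA pins = pvNetScore pins := by
  rw [pvScoreA_eq_pairD, pvPairD_split, pvNetScore,
      pvAxisCost_eq_pairAbs, pvAxisCost_eq_pairAbs]

-- ===== VERDICT (by name: the statement is the Claim_ definition above) =====
theorem reorder_nets_by_manhattan_distance_spec : Claim_equal_reorder_nets_by_manhattan_distance := by
  intro nets _
  show _ = _
  unfold reorder_nets_by_manhattan_distance reorder_nets_by_manhattan_distance_alt
  have : (fun (item : String × List (Int × Int × Int)) => pvScoreA item.2)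
       = (fun item => pvNetScore item.2) := funext fun item => pvScore_eq item.2
  rw [this]
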